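-- pv_equiv track=rewrite | github.com/codingchild2424/2026-lecture-algorithm | lectures/week02/2_lab/homework/skeleton/solution.py | func_e
-- ===== SOURCE A (Python) =====
-- def func_e(n):
--     """What is the time complexity?"""
--     total = 0
--     for i in range(n):
--         j = 1
--         while j < n:
--             total += 1
--             j *= 2
--     return total
-- ===== SOURCE B (Python) =====
-- def func_e(n):
--     """Closed form: each of the n outer iterations counts the powers of 2
--     below n, which is (n-1).bit_length() for n >= 2 and 0 otherwise."""
--     if n <= 1:
--         return 0
--     return n * (n - 1).bit_length()
-- ===== Notes on version B (the rewrite author's own statement) =====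
-- stated objective: faster
-- what changed: Replaced the nested for/while doubling loops by the closed form n * (n-1).bit_length() (0 for n <= 1).
import Mathlib
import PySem

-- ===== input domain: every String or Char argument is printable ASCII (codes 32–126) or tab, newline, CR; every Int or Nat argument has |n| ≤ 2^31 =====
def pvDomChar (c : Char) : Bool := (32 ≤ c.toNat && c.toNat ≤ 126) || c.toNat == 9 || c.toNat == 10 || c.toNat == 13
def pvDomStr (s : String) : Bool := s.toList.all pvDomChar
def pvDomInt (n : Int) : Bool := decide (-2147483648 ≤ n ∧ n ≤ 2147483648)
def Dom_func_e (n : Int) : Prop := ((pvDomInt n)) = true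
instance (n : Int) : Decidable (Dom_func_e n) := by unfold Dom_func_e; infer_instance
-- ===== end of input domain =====

-- B replaces A's nested for/while doubling loops by the closed form n * (n-1).bit_length(); asymptotically faster.


-- ===== PORT A =====
-- the inner 'while j < n: total += 1; j *= 2'; j stays positive (starts at 1, doubles),
-- carried as the proof argument hj so the doubling terminates
def funcEWhile (n j total : Int) (hj : 0 < j) : Int :=
  if h : j < n then funcEWhile n (2 * j) (total + 1) (by omega) else total
termination_by (n - j).toNat
decreasing_by omega

def func_e (n : Int) : Int :=
  (PySem.List.pyRange 0 n 1).foldl (fun total _ => funcEWhile n 1 total one_pos) 0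

-- ===== PORT B =====
def func_e_alt (n : Int) : Int :=
  if n ≤ 1 then 0 else n * (PySem.Int.bitLength (n - 1) : Int)

-- ===== PRECONDITION & SPEC =====
def Spec_func_e (n : Int) (out : Int) : Prop := out = func_e_alt n
instance (n : Int) (out : Int) : Decidable (Spec_func_e n out) := by unfold Spec_func_e; infer_instance

-- ===== CLAIM (what is proved, stated in full; the proofs are below) =====
def Claim_equal_func_e : Prop := ∀ (n : Int), Dom_func_e n → Spec_func_e n (func_e n)

-- ===== LEMMAS AND PROOFS =====

theorem funcEWhile_eq (n j t : Int) (hj : 0 < j) :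
    funcEWhile n j t hj = if h : j < n then funcEWhile n (2 * j) (t + 1) (by omega) else t := by
  rw [funcEWhile]

-- the while loop only adds to 'total'
theorem funcEWhile_shift (n : Int) (j : Int) (hj : 0 < j) (t : Int) :
    funcEWhile n j t hj = t + funcEWhile n j 0 hj := by
  by_cases h : j < n
  · have hm : (n - 2 * j).toNat < (n - j).toNat := by omega
    rw [funcEWhile_eq n j t, funcEWhile_eq n j 0]
    simp only [dif_pos h]
    rw [funcEWhile_shift n (2 * j) (by omega) (t + 1), funcEWhile_shift n (2 * j) (by omega) (0 + 1)]
    ring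
  · rw [funcEWhile_eq n j t, funcEWhile_eq n j 0]
    simp only [dif_neg h]
    ring
termination_by (n - j).toNat
decreasing_by all_goals omega

-- the while-loop count from j equals bit_length of (n-1).toNat / j.toNat
theorem funcEWhile_eq_bitLength (n : Int) (j : Int) (hj : 0 < j) :
    funcEWhile n j 0 hj = (PySem.Int.bitLength (((n - 1).toNat / j.toNat : Nat) : Int) : Int) := by
  by_cases h : j < n
  · rw [funcEWhile_eq n j 0]
    simp only [dif_pos h]
    rw [funcEWhile_shift n (2 * j) (by omega) (0 + 1)]
    have hm : (n - 2 * j).toNat < (n - j).toNat := by omega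
    rw [funcEWhile_eq_bitLength n (2 * j) (by omega)]
    have hjn : (0 : Nat) < j.toNat := by omega
    have hle : j.toNat ≤ (n - 1).toNat := by omega
    have hm1 : 0 < (n - 1).toNat / j.toNat := (Nat.one_le_div_iff hjn).mpr hle
    have h2 : (n - 1).toNat / (2 * j).toNat = ((n - 1).toNat / j.toNat) / 2 := by
      have : (2 * j).toNat = j.toNat * 2 := by omega
      rw [this, ← Nat.div_div_eq_div_mul]
    rw [h2, PySem.Int.bitLength_natCast hm1]
    push_cast
    ring
  · rw [funcEWhile_eq n j 0]
    simp only [dif_neg h]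
    have : (n - 1).toNat / j.toNat = 0 := Nat.div_eq_of_lt (by omega)
    rw [this]
    simp [PySem.Int.bitLength_zero]
termination_by (n - j).toNat
decreasing_by all_goals omega

-- folding 'add a constant' over a list
theorem foldl_const_add (c : Int) (l : List Int) (a : Int) :
    l.foldl (fun t _ => t + c) a = a + l.length * c := by
  induction l generalizing a with
  | nil => simp
  | cons x xs ih => simp [List.foldl, ih]; ring

theorem func_e_closed (n : Int) :
    func_e n = (n.toNat : Int) * funcEWhile n 1 0 one_pos := by
  unfold func_e
  have hfun : (fun (total : Int) (_ : Int) => funcEWhile n 1 total one_pos)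
      = fun total _ => total + funcEWhile n 1 0 one_pos := by
    funext t x; exact funcEWhile_shift n 1 one_pos t
  rw [hfun, foldl_const_add, PySem.List.length_pyRange_one]
  simp

-- ===== VERDICT (by name: the statement is the Claim_ definition above) =====
theorem func_e_spec : Claim_equal_func_e := by
  intro n _
  unfold Spec_func_e func_e_alt
  rw [func_e_closed, funcEWhile_eq_bitLength]
  by_cases hn : n ≤ 1
  · have : (n - 1).toNat / (1 : Int).toNat = 0 := by
      have : (n - 1).toNat = 0 := by omega
      simp [this]
    rw [this]
    simp [hn, PySem.Int.bitLength_zero]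
  · have h1 : (n - 1).toNat / (1 : Int).toNat = (n - 1).toNat := by simp
    have h2 : (((n - 1).toNat : Nat) : Int) = n - 1 := by omega
    rw [h1, h2]
    simp [hn]
    omega
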